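-- pv_equiv track=rewrite | github.com/TsvetomirTsvetkov/Python-Course-101 | week01/03.FinalRound/matrix_bombing_plan.py | how_many_bombed
-- ===== SOURCE A (Python) =====
-- def how_many_bombed(value, x, y, matrix, n, m):
-- 	my_sum = 0
--
-- 	for i in range(0, n):
-- 		for j in range (0, m):
-- 			if i in range(x - 1, x + 2) and j in range(y - 1, y + 2) and (i != x or j != y):
-- 				if matrix[i][j] - value <= 0:
-- 					continue
-- 				else:
-- 					my_sum += matrix[i][j] - value
-- 			else:
-- 				my_sum += matrix[i][j]
--
-- 	return my_sum
-- ===== SOURCE B (Python) =====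
-- def how_many_bombed(value, x, y, matrix, n, m):
--     total = sum(sum(row[:max(m, 0)]) for row in matrix[:max(n, 0)])
--     for i in range(max(0, x - 1), min(n, x + 2)):
--         for j in range(max(0, y - 1), min(m, y + 2)):
--             if i == x and j == y:
--                 continue
--             total -= matrix[i][j] if matrix[i][j] - value <= 0 else value
--     return total
-- ===== Notes on version B (the rewrite author's own statement) =====
-- stated objective: simpler
-- what changed: B computes the plain total of the n-by-m block with one slice-based sum and then subtracts a correction for each of the at most 8 clamped neighbour cells, instead of A's nested scan that tests every cell for range-membership of the 3x3 box.
import Mathlib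
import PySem

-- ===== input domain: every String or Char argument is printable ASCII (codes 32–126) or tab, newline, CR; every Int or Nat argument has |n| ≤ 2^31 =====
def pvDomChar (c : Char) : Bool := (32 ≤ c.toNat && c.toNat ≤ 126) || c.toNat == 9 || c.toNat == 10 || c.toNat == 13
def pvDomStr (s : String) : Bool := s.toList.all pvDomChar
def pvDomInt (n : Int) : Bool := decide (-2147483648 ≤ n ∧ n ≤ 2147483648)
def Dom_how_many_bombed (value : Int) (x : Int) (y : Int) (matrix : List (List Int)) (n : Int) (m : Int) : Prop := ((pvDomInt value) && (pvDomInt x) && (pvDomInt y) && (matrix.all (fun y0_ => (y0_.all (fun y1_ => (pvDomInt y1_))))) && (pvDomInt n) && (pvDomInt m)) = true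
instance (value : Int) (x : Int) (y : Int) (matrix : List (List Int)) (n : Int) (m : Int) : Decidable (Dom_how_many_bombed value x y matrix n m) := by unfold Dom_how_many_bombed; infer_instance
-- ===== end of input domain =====

-- B sums the whole n×m block once and then corrects only the ≤ 8 clamped neighbour cells,
-- instead of testing range-membership of every cell inside the nested scan (objective: simpler).

-- ===== PORT A =====
def how_many_bombed (value : Int) (x : Int) (y : Int) (matrix : List (List Int)) (n : Int) (m : Int) : Int :=
  (PySem.List.pyRange 0 n 1).foldl (fun my_sum i =>
    (PySem.List.pyRange 0 m 1).foldl (fun my_sum j =>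
      if i ∈ PySem.List.pyRange (x - 1) (x + 2) 1 ∧ j ∈ PySem.List.pyRange (y - 1) (y + 2) 1 ∧ (i ≠ x ∨ j ≠ y) then
        if PySem.List.pyGetD (PySem.List.pyGetD matrix i []) j 0 - value ≤ 0 then my_sum
        else my_sum + (PySem.List.pyGetD (PySem.List.pyGetD matrix i []) j 0 - value)
      else my_sum + PySem.List.pyGetD (PySem.List.pyGetD matrix i []) j 0) my_sum) 0

-- ===== PORT B =====
def how_many_bombed_alt (value : Int) (x : Int) (y : Int) (matrix : List (List Int)) (n : Int) (m : Int) : Int :=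
  let total := ((PySem.List.slice matrix none (some (max n 0))).map
      (fun row => (PySem.List.slice row none (some (max m 0))).sum)).sum
  (PySem.List.pyRange (max 0 (x - 1)) (min n (x + 2)) 1).foldl (fun total i =>
    (PySem.List.pyRange (max 0 (y - 1)) (min m (y + 2)) 1).foldl (fun total j =>
      if i = x ∧ j = y then total
      else total - (if PySem.List.pyGetD (PySem.List.pyGetD matrix i []) j 0 - value ≤ 0
                    then PySem.List.pyGetD (PySem.List.pyGetD matrix i []) j 0
                    else value)) total) total

-- ===== PRECONDITION & SPEC =====
-- Pre_ excludes exactly the inputs where A raises IndexError: when both loop ranges are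
-- nonempty, A indexes matrix[i][j] for all 0 ≤ i < n, 0 ≤ j < m.
def Pre_how_many_bombed (value : Int) (x : Int) (y : Int) (matrix : List (List Int)) (n : Int) (m : Int) : Prop :=
  0 < n ∧ 0 < m → n ≤ (matrix.length : Int) ∧ ∀ row ∈ matrix.take n.toNat, m ≤ (row.length : Int)
instance (value : Int) (x : Int) (y : Int) (matrix : List (List Int)) (n : Int) (m : Int) : Decidable (Pre_how_many_bombed value x y matrix n m) := by unfold Pre_how_many_bombed; infer_instance

def pvWitness_how_many_bombed : Int × Int × Int × List (List Int) × Int × Int :=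
  (1, 0, 0, [[1, 2], [3, 4]], 2, 2)

def Spec_how_many_bombed (value : Int) (x : Int) (y : Int) (matrix : List (List Int)) (n : Int) (m : Int) (out : Int) : Prop := out = how_many_bombed_alt value x y matrix n m
instance (value : Int) (x : Int) (y : Int) (matrix : List (List Int)) (n : Int) (m : Int) (out : Int) : Decidable (Spec_how_many_bombed value x y matrix n m out) := by unfold Spec_how_many_bombed; infer_instance

-- ===== CLAIM (what is proved, stated in full; the proofs are below) =====
def Claim_equal_how_many_bombed : Prop := ∀ (value : Int) (x : Int) (y : Int) (matrix : List (List Int)) (n : Int) (m : Int), Dom_how_many_bombed value x y matrix n m → Pre_how_many_bombed value x y matrix n m → Spec_how_many_bombed value x y matrix n m (how_many_bombed value x y matrix n m)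

-- ===== LEMMAS AND PROOFS =====

-- the cell value matrix[i][j] (total, with defaults; only in-range cells matter under Pre_)
def pvCell (matrix : List (List Int)) (i j : Int) : Int :=
  PySem.List.pyGetD (PySem.List.pyGetD matrix i []) j 0

-- B's correction term for a cell of the (clamped) 3×3 neighbourhood
def pvCorr (value x y : Int) (matrix : List (List Int)) (i j : Int) : Int :=
  if i = x ∧ j = y then 0
  else -(if pvCell matrix i j - value ≤ 0 then pvCell matrix i j else value)

-- the correction, extended by 0 outside the 3×3 box
def pvD (value x y : Int) (matrix : List (List Int)) (i j : Int) : Int :=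
  if (x - 1 ≤ i ∧ i < x + 2) ∧ (y - 1 ≤ j ∧ j < y + 2) then pvCorr value x y matrix i j else 0

-- a fold that only adds c j is init + sum
theorem pv_foldl_body_add {β : Type} (l : List β) (f : Int → β → Int) (c : β → Int)
    (h : ∀ s j, f s j = s + c j) (init : Int) : l.foldl f init = init + (l.map c).sum := by
  have hf : f = fun s j => s + c j := by funext s j; exact h s j
  rw [hf, PySem.List.foldl_add]

-- sum of a mapped pyRange is a Finset.Ico sum
theorem pv_sumR (F : Int → Int) (a b : Int) :
    ((PySem.List.pyRange a b 1).map F).sum = ∑ i ∈ Finset.Ico a b, F i := by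
  rcases Int.le_total b a with h | h
  · rw [PySem.List.pyRange_one_eq_nil h, Finset.Ico_eq_empty (by omega)]; simp
  · obtain ⟨k, hk⟩ : ∃ k : ℕ, b = a + k := ⟨(b - a).toNat, by omega⟩
    subst hk
    induction k with
    | zero => rw [PySem.List.pyRange_one_eq_nil (by omega), Finset.Ico_eq_empty (by omega)]; simp
    | succ k ih =>
      have h1 : a ≤ a + (k : Int) := by omega
      have h2 : a + ((k + 1 : ℕ) : Int) = (a + (k : Int)) + 1 := by push_cast; ring
      rw [h2, PySem.List.pyRange_one_succ_right h1, ← Finset.sum_Ico_add_eq_sum_Ico_add_one h1 F]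
      simp only [List.map_append, List.sum_append, List.map_cons, List.map_nil, List.sum_cons,
        List.sum_nil]
      rw [ih h1]
      ring

-- a sum over Ico 0 b as a mapped List.range sum
theorem pv_sumR_nat (F : Int → Int) (b : Int) :
    ∑ i ∈ Finset.Ico (0 : Int) b, F i = ((List.range b.toNat).map (fun k : ℕ => F (k : Int))).sum := by
  rw [← pv_sumR, PySem.List.pyRange_one]
  simp only [sub_zero, List.map_map]
  congr 1
  apply List.map_congr_left
  intro k _
  simp

-- prefix of a list as a map over range of getD
theorem pv_map_getD (row : List Int) (M : Nat) (h : M ≤ row.length) :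
    (List.range M).map (fun k => row.getD k 0) = row.take M := by
  apply List.ext_getElem
  · simp; omega
  · intro k h1 h2
    simp only [List.getElem_map, List.getElem_range, List.getElem_take]
    have hk : k < M := by simpa using h1
    rw [List.getD_eq_getElem row 0 (by omega)]

-- A as a double Finset sum
theorem pv_A_eq (value x y : Int) (matrix : List (List Int)) (n m : Int) :
    how_many_bombed value x y matrix n m
      = ∑ i ∈ Finset.Ico (0 : Int) n, ∑ j ∈ Finset.Ico (0 : Int) m,
          (pvCell matrix i j + pvD value x y matrix i j) := by
  unfold how_many_bombed
  rw [pv_foldl_body_add _ _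
        (fun i => ((PySem.List.pyRange 0 m 1).map
          (fun j => pvCell matrix i j + pvD value x y matrix i j)).sum)
        (fun s i => by
          rw [pv_foldl_body_add _ _ (fun j => pvCell matrix i j + pvD value x y matrix i j)
              (fun t j => by
                simp only [pvCell, pvD, pvCorr, PySem.List.mem_pyRange_one]
                split_ifs <;> omega)])]
  rw [pv_sumR]
  simp only [pv_sumR, zero_add]

-- B as total + double Finset sum of corrections over the clamped box
theorem pv_B_eq (value x y : Int) (matrix : List (List Int)) (n m : Int) :
    how_many_bombed_alt value x y matrix n m
      = ((PySem.List.slice matrix none (some (max n 0))).map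
          (fun row => (PySem.List.slice row none (some (max m 0))).sum)).sum
        + ∑ i ∈ Finset.Ico (max 0 (x - 1)) (min n (x + 2)),
            ∑ j ∈ Finset.Ico (max 0 (y - 1)) (min m (y + 2)), pvCorr value x y matrix i j := by
  unfold how_many_bombed_alt
  rw [pv_foldl_body_add _ _
        (fun i => ((PySem.List.pyRange (max 0 (y - 1)) (min m (y + 2)) 1).map
          (fun j => pvCorr value x y matrix i j)).sum)
        (fun s i => by
          rw [pv_foldl_body_add _ _ (fun j => pvCorr value x y matrix i j)
              (fun t j => by
                simp only [pvCorr, pvCell]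
                split_ifs <;> ring)])]
  rw [pv_sumR]
  simp only [pv_sumR]

-- the plain total over the slices equals the double sum of cell values (under Pre_)
theorem pv_total_eq (value x y : Int) (matrix : List (List Int)) (n m : Int)
    (hpre : Pre_how_many_bombed value x y matrix n m) :
    ((PySem.List.slice matrix none (some (max n 0))).map
        (fun row => (PySem.List.slice row none (some (max m 0))).sum)).sum
      = ∑ i ∈ Finset.Ico (0 : Int) n, ∑ j ∈ Finset.Ico (0 : Int) m, pvCell matrix i j := by
  have hn' : (max n 0) = ((n.toNat : ℕ) : Int) := by omega
  have hm' : (max m 0) = ((m.toNat : ℕ) : Int) := by omega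
  rw [hn', hm', PySem.List.slice_to_natCast]
  simp only [PySem.List.slice_to_natCast]
  by_cases hm : 0 < m
  · by_cases hn : 0 < n
    · obtain ⟨hlen, hrow⟩ := hpre ⟨hn, hm⟩
      have hlen' : n.toNat ≤ matrix.length := by omega
      rw [pv_sumR_nat]
      congr 1
      apply List.ext_getElem
      · simp; omega
      · intro k h1 h2
        have hk : k < n.toNat := by simp at h1; omega
        have hkl : k < matrix.length := by omega
        simp only [List.getElem_map, List.getElem_take, List.getElem_range]
        have hmem : matrix[k] ∈ matrix.take n.toNat := by
          have : (matrix.take n.toNat)[k]'(by simp; omega) ∈ matrix.take n.toNat :=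
            List.getElem_mem _
          simpa using this
        have hrl : m.toNat ≤ matrix[k].length := by
          have := hrow _ hmem; omega
        rw [pv_sumR_nat]
        congr 1
        rw [← pv_map_getD matrix[k] m.toNat hrl]
        apply List.map_congr_left
        intro j hj
        simp only [pvCell, PySem.List.pyGetD_natCast]
        rw [List.getD_eq_getElem matrix [] (by omega)]
    · -- n ≤ 0 : no rows are taken and the outer Ico sum is empty
      have hn0 : n.toNat = 0 := by omega
      rw [hn0]
      simp [Finset.Ico_eq_empty (show ¬ (0 : Int) < n by omega)]
  · -- m ≤ 0 : every row prefix is empty and every inner Ico sum is empty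
    have hm0 : m.toNat = 0 := by omega
    rw [hm0]
    simp [Finset.Ico_eq_empty (show ¬ (0 : Int) < m by omega)]

-- restriction of the zero-extended correction sum to the clamped box
theorem pv_restrict (value x y : Int) (matrix : List (List Int)) (n m : Int) :
    ∑ i ∈ Finset.Ico (0 : Int) n, ∑ j ∈ Finset.Ico (0 : Int) m, pvD value x y matrix i j
      = ∑ i ∈ Finset.Ico (max 0 (x - 1)) (min n (x + 2)),
          ∑ j ∈ Finset.Ico (max 0 (y - 1)) (min m (y + 2)), pvCorr value x y matrix i j := by
  have houter : ∑ i ∈ Finset.Ico (0 : Int) n, ∑ j ∈ Finset.Ico (0 : Int) m, pvD value x y matrix i j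
      = ∑ i ∈ Finset.Ico (max 0 (x - 1)) (min n (x + 2)),
          ∑ j ∈ Finset.Ico (0 : Int) m, pvD value x y matrix i j := by
    rw [Finset.sum_subset (Finset.Ico_subset_Ico (le_max_left 0 (x - 1)) (min_le_left n (x + 2)))]
    intro i hi hni
    apply Finset.sum_eq_zero
    intro j _
    simp only [Finset.mem_Ico, max_le_iff, lt_min_iff, not_and, not_lt] at hi hni
    simp only [pvD]
    rw [if_neg]
    omega
  rw [houter]
  apply Finset.sum_congr rfl
  intro i hi
  simp only [Finset.mem_Ico, max_le_iff, lt_min_iff] at hi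
  rw [← Finset.sum_subset
      (Finset.Ico_subset_Ico (le_max_left 0 (y - 1)) (min_le_left m (y + 2)))
      (by
        intro j hj hnj
        simp only [Finset.mem_Ico, max_le_iff, lt_min_iff, not_and, not_lt] at hj hnj
        simp only [pvD]
        rw [if_neg]
        omega)]
  apply Finset.sum_congr rfl
  intro j hj
  simp only [Finset.mem_Ico, max_le_iff, lt_min_iff] at hj
  simp only [pvD]
  rw [if_pos]
  omega

-- ===== VERDICT (by name: the statement is the Claim_ definition above) =====
theorem how_many_bombed_spec : Claim_equal_how_many_bombed := by
  intro value x y matrix n m _ hpre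
  unfold Spec_how_many_bombed
  rw [pv_A_eq, pv_B_eq, pv_total_eq value x y matrix n m hpre, ← pv_restrict]
  rw [← Finset.sum_add_distrib]
  apply Finset.sum_congr rfl
  intro i _
  rw [← Finset.sum_add_distrib]
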